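-- pv_equiv track=rewrite | github.com/huawei-noah/vega | vega/networks/pytorch/backbones/backbone_tools.py | remove_layers
-- ===== SOURCE A (Python) =====
-- def remove_layers(layer_arch, p_arch, len_dis):
--     """Remove expand layers in serailnet than pretrained architecture.
--
--     :param layer_arch: current serailnet encode
--     :type layer_arch: str
--     :param p_arch: pretrained serailnet encode
--     :type p_arch: str
--     :param len_dis: num of blocks more than pretrain
--     :type len_dis: int
--     :return: more expand block name
--     :rtype: list
--     """
--
--     def map_index_to_name(index, layer_arch):
--         name = []
--         for i in index:
--             for layer in range(1, len(layer_arch) + 1):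
--                 if i < len(''.join(layer_arch[:layer])):
--                     block_i = i - len(''.join(layer_arch[:layer - 1]))
--                     n = 'layer' + str(layer) + '.' + str(block_i) + '.'
--                     name.append(n)
--                     break
--         return name
--
--     def find_diff_index(pos, new_arch, old_arch):
--         agg_arch = zip(new_arch, old_arch)
--         for i, tup in enumerate(agg_arch):
--             if tup[0] != tup[1]:
--                 if len(pos) < 1:
--                     pos.append(i)
--                 else:
--                     pos.append(i + pos[-1] + 1)
--                 return find_diff_index(pos, new_arch[i + 1:], old_arch[i:])
--                 break
--         return pos
--
--     def get_bn_layers(remove_name, layer_arch, p_arch):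
--         bn_layers = [n + 'bn{}'.format(i)
--                      for n in remove_name for i in range(1, 4)]
--         p_len = len(p_arch.split('-'))
--         for i in range(1, len(layer_arch) - p_len + 1):
--             bn_layers.append('layer{}.0.downsample.1'.format(p_len + i))
--         return bn_layers
--
--     pretrained_arch = ''.join(p_arch.split('-'))
--     remove_index = find_diff_index([], ''.join(layer_arch), pretrained_arch)
--     if len(remove_index) < len_dis:
--         if len(layer_arch) > len(p_arch.split('-')):
--             len_dis = len_dis - (len(layer_arch) - len(p_arch.split('-')))
--         remove_index = remove_index + list(range(len(''.join(layer_arch)) - len_dis + len(remove_index),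
--                                                  len(''.join(layer_arch))))
--     remove_name = map_index_to_name(remove_index, layer_arch)
--     bn_layers = get_bn_layers(remove_name, layer_arch, p_arch)
--     return remove_name, bn_layers
-- ===== SOURCE B (Python) =====
-- def remove_layers(layer_arch, p_arch, len_dis):
--     """Same result as A, computed in one pass: the pretrained/current encode
--     diff is found with an iterative two-pointer walk (no recursion, no slicing),
--     and index->layer-name mapping uses a cumulative-prefix-length table built
--     once instead of re-joining list prefixes for every candidate layer."""
--     new = ''.join(layer_arch)
--     old = ''.join(p_arch.split('-'))
--
--     # two-pointer diff: absolute indices in `new` of extra blocks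
--     idx = []
--     i = j = 0
--     while i < len(new) and j < len(old):
--         if new[i] != old[j]:
--             idx.append(i)
--             i += 1
--         else:
--             i += 1
--             j += 1
--
--     p_len = len(p_arch.split('-'))
--     if len(idx) < len_dis:
--         if len(layer_arch) > p_len:
--             len_dis = len_dis - (len(layer_arch) - p_len)
--         idx = idx + list(range(len(new) - len_dis + len(idx), len(new)))
--
--     # cumulative prefix lengths, built once
--     cum = []
--     t = 0
--     for s in layer_arch:
--         t += len(s)
--         cum.append(t)
--
--     names = []
--     for k in idx:
--         prev = 0
--         layer = 1
--         found = None
--         for c in cum: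
--             if c <= k:
--                 prev = c
--                 layer += 1
--             else:
--                 found = 'layer' + str(layer) + '.' + str(k - prev) + '.'
--                 break
--         if found is not None:
--             names.append(found)
--
--     bn = []
--     for n in names:
--         bn.append(n + 'bn1')
--         bn.append(n + 'bn2')
--         bn.append(n + 'bn3')
--     for layer in range(p_len + 1, len(layer_arch) + 1):
--         bn.append('layer' + str(layer) + '.0.downsample.1')
--     return names, bn
-- ===== Notes on version B (the rewrite author's own statement) =====
-- stated objective: faster
-- what changed: B finds the differing block indices with an iterative two-pointer walk instead of A's recursion over string slices, and maps each index to its layer via a cumulative prefix-length table built once instead of re-joining every list prefix for every index and candidate layer.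
import Mathlib
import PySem

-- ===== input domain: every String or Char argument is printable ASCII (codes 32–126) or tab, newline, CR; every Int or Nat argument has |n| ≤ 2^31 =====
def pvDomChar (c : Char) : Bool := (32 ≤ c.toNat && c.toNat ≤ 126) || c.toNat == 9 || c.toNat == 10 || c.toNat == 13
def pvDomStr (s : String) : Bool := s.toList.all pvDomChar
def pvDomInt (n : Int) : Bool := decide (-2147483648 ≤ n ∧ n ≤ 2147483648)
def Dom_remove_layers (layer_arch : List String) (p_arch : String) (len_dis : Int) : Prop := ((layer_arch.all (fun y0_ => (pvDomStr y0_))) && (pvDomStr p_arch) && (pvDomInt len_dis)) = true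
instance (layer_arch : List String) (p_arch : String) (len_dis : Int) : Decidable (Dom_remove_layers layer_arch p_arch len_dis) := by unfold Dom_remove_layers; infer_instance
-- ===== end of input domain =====

-- B replaces A's recursive slicing diff by an iterative two-pointer walk and A's per-index
-- re-joined list prefixes by a cumulative-prefix-length table built once (objective: faster).

-- ===== PORT A =====

-- p_arch.split('-'): sep is the non-empty literal "-", so split? is always `some`; getD [] is unreachable
def pvSplitDash (s : String) : List String := (PySem.Str.split? s "-").getD []

-- `for i, tup in enumerate(zip(new_arch, old_arch)): if tup[0] != tup[1]: …` with an early return: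
-- the scan for the first mismatching position, as structural recursion over the two char lists
def pvFirstDiffA : List Char → List Char → Option Nat
  | a :: as, b :: bs => if a ≠ b then some 0 else (pvFirstDiffA as bs).map (· + 1)
  | _, _ => none

lemma pvFirstDiffA_lt : ∀ (n o : List Char) (i : Nat), pvFirstDiffA n o = some i → i < n.length := by
  intro n
  induction n with
  | nil => intro o i h; simp [pvFirstDiffA] at h
  | cons a as ih =>
    intro o i h
    cases o with
    | nil => simp [pvFirstDiffA] at h
    | cons b bs =>
      by_cases hab : a ≠ b
      · simp [pvFirstDiffA, hab] at h
        simp [← h]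
      · simp [pvFirstDiffA, hab] at h
        obtain ⟨j, hj, rfl⟩ := h
        have := ih bs j hj
        simp
        omega

-- find_diff_index(pos, new_arch, old_arch); new_arch[i+1:]/old_arch[i:] with i ≥ 0 are List.drop (exact)
def pvFindDiffA (pos : List Int) (newA oldA : List Char) : List Int :=
  match h : pvFirstDiffA newA oldA with
  | none => pos
  | some i =>
    -- pos[-1] via pyGet?; the else-branch runs only with pos ≠ [], so getD 0 is unreachable
    pvFindDiffA
      (pos ++ [if pos.length < 1 then (i : Int) else (i : Int) + ((PySem.List.pyGet? pos (-1)).getD 0) + 1])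
      (newA.drop (i + 1)) (oldA.drop i)
termination_by newA.length
decreasing_by
  have := pvFirstDiffA_lt newA oldA i h
  simp only [List.length_drop]
  omega

-- the inner `for layer in range(1, len(layer_arch)+1): if i < len(''.join(layer_arch[:layer])): …; break`
def pvInnerA (i : Int) (layer_arch : List String) : List Int → Option String
  | [] => none
  | layer :: rest =>
    if i < PySem.Str.len (PySem.Str.join "" (PySem.List.slice layer_arch (some 0) (some layer))) then
      some ("layer" ++ PySem.Int.toStr layer ++ "." ++
            PySem.Int.toStr (i - PySem.Str.len (PySem.Str.join "" (PySem.List.slice layer_arch (some 0) (some (layer - 1))))) ++ ".")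
    else pvInnerA i layer_arch rest

def pvMapIndexToNameA (index : List Int) (layer_arch : List String) : List String :=
  index.foldl (fun name i =>
    match pvInnerA i layer_arch (PySem.List.pyRange 1 ((layer_arch.length : Int) + 1) 1) with
    | some n => name ++ [n]
    | none => name) []

def pvGetBnLayersA (remove_name : List String) (layer_arch : List String) (p_arch : String) : List String :=
  let bn_layers := remove_name.flatMap (fun n => (PySem.List.pyRange 1 4 1).map (fun i => n ++ "bn" ++ PySem.Int.toStr i))
  let p_len : Int := ((pvSplitDash p_arch).length : Int)
  (PySem.List.pyRange 1 ((layer_arch.length : Int) - p_len + 1) 1).foldl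
    (fun acc i => acc ++ ["layer" ++ PySem.Int.toStr (p_len + i) ++ ".0.downsample.1"]) bn_layers

def remove_layers (layer_arch : List String) (p_arch : String) (len_dis : Int) : List String × List String :=
  let pretrained_arch := PySem.Str.join "" (pvSplitDash p_arch)
  let joined := PySem.Str.join "" layer_arch
  let remove_index := pvFindDiffA [] joined.toList pretrained_arch.toList
  let remove_index :=
    if (remove_index.length : Int) < len_dis then
      let len_dis' :=
        if layer_arch.length > (pvSplitDash p_arch).length then
          len_dis - ((layer_arch.length : Int) - ((pvSplitDash p_arch).length : Int))
        else len_dis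
      remove_index ++ PySem.List.pyRange (PySem.Str.len joined - len_dis' + (remove_index.length : Int)) (PySem.Str.len joined) 1
    else remove_index
  let remove_name := pvMapIndexToNameA remove_index layer_arch
  (remove_name, pvGetBnLayersA remove_name layer_arch p_arch)

-- ===== PORT B =====

-- the two-pointer while loop; new[i]/old[j] are the heads of the un-consumed suffixes (exact)
def pvDiffB : List Char → List Char → Int → List Int → List Int
  | a :: as, b :: bs, i, acc =>
    if a ≠ b then pvDiffB as (b :: bs) (i + 1) (acc ++ [i])
    else pvDiffB as bs (i + 1) acc
  | _, _, _, acc => acc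

-- `cum = []; t = 0; for s in layer_arch: t += len(s); cum.append(t)`
def pvCumB (layer_arch : List String) : List Int :=
  (layer_arch.foldl (fun (p : List Int × Int) s =>
    ((p.1 ++ [p.2 + PySem.Str.len s]), p.2 + PySem.Str.len s)) ([], 0)).1

-- the `for c in cum:` loop of B with accumulators prev/layer and break-on-first-larger
def pvNameB (k : Int) (prev : Int) (layer : Int) : List Int → Option String
  | [] => none
  | c :: rest =>
    if c ≤ k then pvNameB k c (layer + 1) rest
    else some ("layer" ++ PySem.Int.toStr layer ++ "." ++ PySem.Int.toStr (k - prev) ++ ".")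

def remove_layers_alt (layer_arch : List String) (p_arch : String) (len_dis : Int) : List String × List String :=
  let newC := (PySem.Str.join "" layer_arch).toList
  let oldC := (PySem.Str.join "" (pvSplitDash p_arch)).toList
  let idx := pvDiffB newC oldC 0 []
  let p_len := (pvSplitDash p_arch).length
  let idx :=
    if (idx.length : Int) < len_dis then
      let len_dis' :=
        if layer_arch.length > p_len then len_dis - ((layer_arch.length : Int) - (p_len : Int)) else len_dis
      idx ++ PySem.List.pyRange ((newC.length : Int) - len_dis' + (idx.length : Int)) (newC.length : Int) 1
    else idx
  let cum := pvCumB layer_arch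
  let names := idx.foldl (fun ns k =>
    match pvNameB k 0 1 cum with
    | some n => ns ++ [n]
    | none => ns) []
  let bn := names.foldl (fun acc n => acc ++ [n ++ "bn1", n ++ "bn2", n ++ "bn3"]) []
  let bn := (PySem.List.pyRange ((p_len : Int) + 1) ((layer_arch.length : Int) + 1) 1).foldl
    (fun acc layer => acc ++ ["layer" ++ PySem.Int.toStr layer ++ ".0.downsample.1"]) bn
  (names, bn)

-- ===== PRECONDITION & SPEC =====
def Spec_remove_layers (layer_arch : List String) (p_arch : String) (len_dis : Int) (out : List String × List String) : Prop := out = remove_layers_alt layer_arch p_arch len_dis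
instance (layer_arch : List String) (p_arch : String) (len_dis : Int) (out : List String × List String) : Decidable (Spec_remove_layers layer_arch p_arch len_dis out) := by unfold Spec_remove_layers; infer_instance

-- ===== CLAIM (what is proved, stated in full; the proofs are below) =====
def Claim_equal_remove_layers : Prop := ∀ (layer_arch : List String) (p_arch : String) (len_dis : Int), Dom_remove_layers layer_arch p_arch len_dis → Spec_remove_layers layer_arch p_arch len_dis (remove_layers layer_arch p_arch len_dis)

-- ===== LEMMAS AND PROOFS =====

/-- canonical absolute-index diff: reference both diff routines are reduced to -/
def pvAbsDiff : List Char → List Char → Int → List Int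
  | a :: as, b :: bs, i =>
    if a ≠ b then i :: pvAbsDiff as (b :: bs) (i + 1) else pvAbsDiff as bs (i + 1)
  | _, _, _ => []

lemma pvDiffB_eq : ∀ (n o : List Char) (i : Int) (acc : List Int),
    pvDiffB n o i acc = acc ++ pvAbsDiff n o i := by
  intro n
  induction n with
  | nil => intro o i acc; cases o <;> simp [pvDiffB, pvAbsDiff]
  | cons a as ih =>
    intro o i acc
    cases o with
    | nil => simp [pvDiffB, pvAbsDiff]
    | cons b bs =>
      by_cases hab : a ≠ b <;> simp [pvDiffB, pvAbsDiff, hab, ih]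

lemma pvAbsDiff_nil_of_none : ∀ (n o : List Char) (i : Int),
    pvFirstDiffA n o = none → pvAbsDiff n o i = [] := by
  intro n
  induction n with
  | nil => intro o i _; cases o <;> simp [pvAbsDiff]
  | cons a as ih =>
    intro o i h
    cases o with
    | nil => simp [pvAbsDiff]
    | cons b bs =>
      by_cases hab : a ≠ b
      · simp [pvFirstDiffA, hab] at h
      · simp [pvFirstDiffA, hab] at h
        simp [pvAbsDiff, hab, ih bs (i + 1) h]

lemma pvAbsDiff_of_some : ∀ (n o : List Char) (k : Nat) (i : Int),
    pvFirstDiffA n o = some k →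
    pvAbsDiff n o i = (i + k) :: pvAbsDiff (n.drop (k + 1)) (o.drop k) (i + k + 1) := by
  intro n
  induction n with
  | nil => intro o k i h; simp [pvFirstDiffA] at h
  | cons a as ih =>
    intro o k i h
    cases o with
    | nil => simp [pvFirstDiffA] at h
    | cons b bs =>
      by_cases hab : a ≠ b
      · simp [pvFirstDiffA, hab] at h
        subst h
        simp [pvAbsDiff, hab]
      · simp [pvFirstDiffA, hab] at h
        obtain ⟨j, hj, rfl⟩ := h
        have := ih bs j (i + 1) hj
        simp [pvAbsDiff, hab, this]
        constructor
        · ring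
        · congr 1; ring

/-- the offset the recursive A-side diff carries in `pos[-1]` -/
def pvOff (acc : List Int) : Int :=
  if acc.length < 1 then 0 else ((PySem.List.pyGet? acc (-1)).getD 0) + 1

lemma pvFindDiffA_eq : ∀ (N : Nat) (n o : List Char) (acc : List Int), n.length ≤ N →
    pvFindDiffA acc n o = acc ++ pvAbsDiff n o (pvOff acc) := by
  intro N
  induction N with
  | zero =>
    intro n o acc hn
    have hn0 : n = [] := by cases n <;> simp_all
    subst hn0
    rw [pvFindDiffA]
    cases o <;> simp [pvFirstDiffA, pvAbsDiff]
  | succ N ih =>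
    intro n o acc hn
    rw [pvFindDiffA]
    split
    case _ h => simp [pvAbsDiff_nil_of_none n o _ h]
    case _ k h =>
      have hk := pvFirstDiffA_lt n o k h
      have hv : (if acc.length < 1 then (k : Int)
          else (k : Int) + ((PySem.List.pyGet? acc (-1)).getD 0) + 1) = pvOff acc + k := by
        unfold pvOff
        split_ifs <;> ring
      rw [hv, ih (n.drop (k + 1)) (o.drop k) (acc ++ [pvOff acc + k]) (by simp; omega)]
      rw [pvAbsDiff_of_some n o k _ h]
      have hoff : pvOff (acc ++ [pvOff acc + k]) = pvOff acc + k + 1 := by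
        unfold pvOff
        simp [PySem.List.pyGet?_neg_one_append_singleton]
      rw [hoff]
      simp

/-- the cum entries from a running offset -/
def pvCumFrom (t : Int) : List String → List Int
  | [] => []
  | s :: r => (t + PySem.Str.len s) :: pvCumFrom (t + PySem.Str.len s) r

lemma pvCumB_foldl : ∀ (l : List String) (acc : List Int) (t : Int),
    l.foldl (fun (p : List Int × Int) s =>
      ((p.1 ++ [p.2 + PySem.Str.len s]), p.2 + PySem.Str.len s)) (acc, t)
      = (acc ++ pvCumFrom t l, t + ((l.map PySem.Str.len).sum)) := by
  intro l
  induction l with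
  | nil => simp [pvCumFrom]
  | cons s r ih =>
    intro acc t
    simp only [List.foldl_cons]
    rw [ih]
    refine Prod.ext ?_ ?_
    · simp [pvCumFrom]
    · simp; ring

lemma pvCumB_eq (layer_arch : List String) : pvCumB layer_arch = pvCumFrom 0 layer_arch := by
  unfold pvCumB
  rw [pvCumB_foldl]
  simp

lemma pvLenJoin : ∀ (l : List String),
    PySem.Str.len (PySem.Str.join "" l) = (l.map PySem.Str.len).sum := by
  intro l
  induction l with
  | nil => decide
  | cons s r ih =>
    rw [PySem.Str.len_eq, PySem.Str.toList_join]
    cases r with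
    | nil =>
      have h0 : ("".toList : List Char) = [] := rfl
      simp only [List.map_cons, List.map_nil, h0, PySem.Chars.join_singleton]
      simp [PySem.Str.len_eq]
    | cons q rr =>
      have h0 : ("".toList : List Char) = [] := rfl
      simp only [List.map_cons, h0]
      rw [PySem.Chars.join_cons_cons]
      rw [PySem.Str.len_eq, PySem.Str.toList_join] at ih
      simp [PySem.Str.len_eq] at ih ⊢
      omega

lemma pvInner_eq_name : ∀ (rest pre : List String) (k : Int),
    pvInnerA k (pre ++ rest)
      (PySem.List.pyRange ((pre.length : Int) + 1) ((pre.length : Int) + (rest.length : Int) + 1) 1)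
      = pvNameB k ((pre.map PySem.Str.len).sum) ((pre.length : Int) + 1) (pvCumFrom ((pre.map PySem.Str.len).sum) rest) := by
  intro rest
  induction rest with
  | nil =>
    intro pre k
    rw [PySem.List.pyRange_one_eq_nil (by simp)]
    simp [pvInnerA, pvNameB, pvCumFrom]
  | cons s r ih =>
    intro pre k
    rw [PySem.List.pyRange_one_cons (by simp only [List.length_cons]; push_cast; omega)]
    simp only [pvInnerA, pvCumFrom, pvNameB, List.length_cons]
    have hc2 : ((pre.length : Int) + 1 - 1) = ((pre.length : Nat) : Int) := by ring
    rw [hc2]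
    have hc1 : ((pre.length : Int) + 1) = (((pre.length + 1 : Nat)) : Int) := by push_cast; ring
    rw [hc1, PySem.List.slice_zero_start, PySem.List.slice_zero_start,
        PySem.List.slice_to_natCast, PySem.List.slice_to_natCast]
    have ht1 : List.take (pre.length + 1) (pre ++ s :: r) = pre ++ [s] := by
      have := List.take_length_add_append (l₁ := pre) (l₂ := s :: r) (i := 1)
      simpa using this
    have ht2 : List.take pre.length (pre ++ s :: r) = pre := by simp
    rw [ht1, ht2, pvLenJoin, pvLenJoin]
    simp only [List.map_append, List.map_cons, List.map_nil, List.sum_append, List.sum_cons,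
      List.sum_nil, add_zero]
    by_cases hk : k < (pre.map PySem.Str.len).sum + PySem.Str.len s
    · rw [if_pos hk, if_neg (by omega)]
    · rw [if_neg hk, if_pos (by omega)]
      have hih := ih (pre ++ [s]) k
      simp only [List.append_assoc, List.singleton_append, List.length_append,
        List.length_cons, List.length_nil, List.map_append, List.map_cons, List.map_nil,
        List.sum_append, List.sum_cons, List.sum_nil, add_zero] at hih
      push_cast at hih
      convert hih using 2
      congr 1
      all_goals push_cast
      all_goals ring

lemma pvInner_top (layer_arch : List String) (k : Int) :
    pvInnerA k layer_arch (PySem.List.pyRange 1 ((layer_arch.length : Int) + 1) 1)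
      = pvNameB k 0 1 (pvCumB layer_arch) := by
  have := pvInner_eq_name layer_arch [] k
  simpa [pvCumB_eq] using this

lemma pvNames_eq (I : List Int) (layer_arch : List String) :
    pvMapIndexToNameA I layer_arch
      = I.foldl (fun ns k =>
          match pvNameB k 0 1 (pvCumB layer_arch) with
          | some n => ns ++ [n]
          | none => ns) [] := by
  unfold pvMapIndexToNameA
  apply PySem.List.foldl_congr_mem
  intro acc k _
  rw [pvInner_top]

lemma pvRangeShiftFold (mk : Int → String) :
    ∀ (N : Nat) (a b p : Int) (acc : List String), (b - a).toNat ≤ N →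
    (PySem.List.pyRange a b 1).foldl (fun acc i => acc ++ [mk (p + i)]) acc
      = (PySem.List.pyRange (a + p) (b + p) 1).foldl (fun acc i => acc ++ [mk i]) acc := by
  intro N
  induction N with
  | zero =>
    intro a b p acc h
    rw [PySem.List.pyRange_one_eq_nil (by omega), PySem.List.pyRange_one_eq_nil (by omega)]
    rfl
  | succ N ih =>
    intro a b p acc h
    by_cases hab : a < b
    · rw [PySem.List.pyRange_one_cons hab, PySem.List.pyRange_one_cons (by omega : a + p < b + p)]
      simp only [List.foldl_cons]
      rw [show a + p + 1 = (a + 1) + p by ring, show a + p = p + a by ring]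
      exact ih (a + 1) b p (acc ++ [mk (p + a)]) (by omega)
    · rw [PySem.List.pyRange_one_eq_nil (by omega), PySem.List.pyRange_one_eq_nil (by omega)]
      rfl

lemma pvBn_eq (names layer_arch : List String) (p_arch : String) :
    pvGetBnLayersA names layer_arch p_arch
      = (PySem.List.pyRange (((pvSplitDash p_arch).length : Int) + 1) ((layer_arch.length : Int) + 1) 1).foldl
          (fun acc layer => acc ++ ["layer" ++ PySem.Int.toStr layer ++ ".0.downsample.1"])
          (names.foldl (fun acc n => acc ++ [n ++ "bn1", n ++ "bn2", n ++ "bn3"]) []) := by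
  simp only [pvGetBnLayersA]
  have hflat : names.flatMap (fun n => (PySem.List.pyRange 1 4 1).map (fun i => n ++ "bn" ++ PySem.Int.toStr i))
      = names.flatMap (fun n => [n ++ "bn1", n ++ "bn2", n ++ "bn3"]) := by
    have hr : PySem.List.pyRange 1 4 1 = [1, 2, 3] := by decide
    have h1 : ("bn" ++ PySem.Int.toStr 1 : String) = "bn1" := by decide
    have h2 : ("bn" ++ PySem.Int.toStr 2 : String) = "bn2" := by decide
    have h3 : ("bn" ++ PySem.Int.toStr 3 : String) = "bn3" := by decide
    simp only [hr, List.map_cons, List.map_nil, String.append_assoc, h1, h2, h3]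
  rw [hflat, PySem.List.foldl_append_eq_flatMap (fun n => [n ++ "bn1", n ++ "bn2", n ++ "bn3"]) names [], List.nil_append]
  rw [pvRangeShiftFold (fun x => "layer" ++ PySem.Int.toStr x ++ ".0.downsample.1")
        ((((layer_arch.length : Int) - ((pvSplitDash p_arch).length : Int) + 1) - 1).toNat) _ _ _ _ le_rfl]
  rw [show (1 : Int) + ((pvSplitDash p_arch).length : Int) = ((pvSplitDash p_arch).length : Int) + 1 by ring,
      show ((layer_arch.length : Int) - ((pvSplitDash p_arch).length : Int) + 1 + ((pvSplitDash p_arch).length : Int)) = ((layer_arch.length : Int) + 1) by ring]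

-- ===== VERDICT (by name: the statement is the Claim_ definition above) =====
theorem remove_layers_spec : Claim_equal_remove_layers := by
  intro layer_arch p_arch len_dis _
  simp only [Spec_remove_layers, remove_layers, remove_layers_alt]
  have hidx : pvFindDiffA [] (PySem.Str.join "" layer_arch).toList
      (PySem.Str.join "" (pvSplitDash p_arch)).toList
      = pvDiffB (PySem.Str.join "" layer_arch).toList
          (PySem.Str.join "" (pvSplitDash p_arch)).toList 0 [] := by
    rw [pvFindDiffA_eq _ _ _ _ le_rfl, pvDiffB_eq]
    norm_num [pvOff]
  simp only [hidx, PySem.Str.len_eq]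
  rw [pvNames_eq, pvBn_eq]
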